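-- pv_equiv track=rewrite | github.com/Tolmeton/Hegemonikon | 20_機構｜Mekhane/_src｜ソースコード/mekhane/dendron/circulation_detector.py | _compute_gf_fixpoint
-- ===== SOURCE A (Python) =====
-- def _compute_gf_fixpoint(
--     scc_set: set[str],
--     edges: dict[str, set[str]],
--     reverse_edges: dict[str, set[str]],
-- ) -> tuple[set[str], int]:
--     """G∘F 反復で SCC 内の不動点 (循環の核) を求める.
--
--     F (発散): SCC 内の各ノードの到達可能範囲 (= 次のステップに必要)
--     G (収束): SCC 内で入次数=0 のノードを除去 (循環に不要)
--
--     反復: 全体 → 刈り込み → ... → Fix (もう刈れない)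
--     計算量: O(N²) = P (CKDF §5.2: 有限束なら最大 N 回)
--
--     Args:
--         scc_set: SCC に含まれるノード集合
--         edges: 順方向エッジ
--         reverse_edges: 逆方向エッジ
--
--     Returns:
--         (不動点ノード集合, 反復回数)
--     """
--     current = set(scc_set)
--     iterations = 0
--
--     while True:
--         # G (収束): 現在の部分グラフ内で入次数=0 のノードを除去
--         # 入次数=0 = 循環に寄与しない末端ノード
--         to_remove: set[str] = set()
--         for node in current:
--             # 現在の部分グラフ内での入次数
--             in_degree = sum(
--                 1 for src in reverse_edges.get(node, set())
--                 if src in current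
--             )
--             if in_degree == 0:
--                 to_remove.add(node)
--
--         if not to_remove:
--             # 不動点到達: もう刈り込めない
--             break
--
--         current -= to_remove
--         iterations += 1
--
--         if not current:
--             # 全て刈り込まれた (循環が存在しない退化ケース)
--             break
--
--     return current, iterations
-- ===== SOURCE B (Python) =====
-- def _compute_gf_fixpoint(
--     scc_set: set[str],
--     edges: dict[str, set[str]],
--     reverse_edges: dict[str, set[str]],
-- ) -> tuple[set[str], int]:
--     """Level peeling over neighbour indexes: only nodes whose in-neighbour was just removed are re-examined."""
--     nodes = set(scc_set)
--     innbrs: dict[str, set[str]] = {}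
--     out: dict[str, set[str]] = {}
--     for n in nodes:
--         srcs = {s for s in reverse_edges.get(n, set()) if s in nodes}
--         innbrs[n] = srcs
--         for s in srcs:
--             out.setdefault(s, set()).add(n)
--
--     removed: set[str] = set()
--     frontier = {n for n in nodes if not innbrs[n]}
--     iterations = 0
--     while frontier:
--         removed |= frontier
--         iterations += 1
--         candidates = {v for u in frontier for v in out.get(u, set()) if v not in removed}
--         frontier = {v for v in candidates if innbrs[v] <= removed}
--     return nodes - removed, iterations
-- ===== Notes on version B (the rewrite author's own statement) =====
-- stated objective: alternative
-- what changed: A rescans every surviving node each wave and recomputes its in-degree from scratch; B builds in-neighbour/out-neighbour indexes once and then peels level by level, re-examining only the out-neighbours of just-removed nodes, so untouched nodes are never revisited.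
import Mathlib
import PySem

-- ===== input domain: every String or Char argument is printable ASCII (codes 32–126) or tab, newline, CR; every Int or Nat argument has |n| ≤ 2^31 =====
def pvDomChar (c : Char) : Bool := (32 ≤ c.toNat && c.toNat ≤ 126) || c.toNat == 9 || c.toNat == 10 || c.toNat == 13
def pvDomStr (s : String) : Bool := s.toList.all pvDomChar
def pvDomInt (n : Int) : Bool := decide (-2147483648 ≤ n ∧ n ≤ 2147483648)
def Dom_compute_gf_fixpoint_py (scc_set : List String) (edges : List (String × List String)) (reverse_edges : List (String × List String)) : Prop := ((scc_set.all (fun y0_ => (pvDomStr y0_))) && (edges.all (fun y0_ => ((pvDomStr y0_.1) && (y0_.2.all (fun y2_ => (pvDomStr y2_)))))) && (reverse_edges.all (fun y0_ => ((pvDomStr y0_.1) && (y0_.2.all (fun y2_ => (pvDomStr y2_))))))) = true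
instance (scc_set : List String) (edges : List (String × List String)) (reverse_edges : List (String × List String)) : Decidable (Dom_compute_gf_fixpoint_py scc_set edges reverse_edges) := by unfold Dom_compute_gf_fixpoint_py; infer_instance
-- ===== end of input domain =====

-- B replaces A's per-wave rescan of every node (recomputing in-degrees from scratch) by level
-- peeling over precomputed neighbour indexes that re-examines only the out-neighbours of
-- just-removed nodes; a genuinely different traversal of similar measured cost (alternative).


-- ===== PORT A =====
-- in_degree = sum(1 for src in reverse_edges.get(node, set()) if src in current)
def pvIndegA (revd : PySem.Dict String (List String)) (current : PySem.Set String) (node : String) : Int :=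
  (PySem.Set.ofList (revd.getD node [])).foldl
    (fun acc src => if PySem.Set.contains current src then acc + 1 else acc) 0

-- to_remove = set(); for node in current: if in_degree == 0: to_remove.add(node)
def pvToRemove (revd : PySem.Dict String (List String)) (current : PySem.Set String) : PySem.Set String :=
  current.foldl
    (fun tr node => if pvIndegA revd current node = 0 then PySem.Set.add tr node else tr)
    PySem.Set.empty

-- the 'while True' loop; fuel (|current| + 1) is only a totality guard: each pass removes
-- at least one node, so the 0 branch is never reached
def pvLoopA (revd : PySem.Dict String (List String)) :
    Nat → PySem.Set String → Int → List String × Int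
  | 0, current, iterations => (current, iterations)
  | fuel+1, current, iterations =>
      let to_remove := pvToRemove revd current
      if to_remove.isEmpty then (current, iterations)
      else
        let current' := PySem.Set.diff current to_remove
        if current'.isEmpty then (current', iterations + 1)
        else pvLoopA revd fuel current' (iterations + 1)

def compute_gf_fixpoint_py (scc_set : List String) (edges : List (String × List String)) (reverse_edges : List (String × List String)) : List String × Int :=
  let revd := PySem.Dict.ofList reverse_edges
  let current := PySem.Set.ofList scc_set
  pvLoopA revd (current.length + 1) current 0

-- ===== PORT B =====
-- srcs = {s for s in reverse_edges.get(n, set()) if s in nodes}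
def pvSrcsOf (revd : PySem.Dict String (List String)) (nodes : PySem.Set String) (n : String) : PySem.Set String :=
  (PySem.Set.ofList (revd.getD n [])).foldl
    (fun s src => if PySem.Set.contains nodes src then PySem.Set.add s src else s) PySem.Set.empty

-- the build loop over nodes: innbrs[n] = srcs; for s in srcs: out.setdefault(s, set()).add(n)
-- ('setdefault(s, set()).add(n)' is exactly 'modify s [] (PySem.Set.add · n)': out[s] = out.get(s, set()) ∪ {n})
def pvBuild (revd : PySem.Dict String (List String)) (nodes : PySem.Set String) :
    PySem.Dict String (List String) × PySem.Dict String (List String) :=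
  nodes.foldl
    (fun p n =>
      let srcs := pvSrcsOf revd nodes n
      (p.1.insert n srcs,
       srcs.foldl (fun o s => o.modify s [] (fun t => PySem.Set.add t n)) p.2))
    (PySem.Dict.empty, PySem.Dict.empty)

-- candidates = {v for u in frontier for v in out.get(u, set()) if v not in removed}
def pvCandidates (out : PySem.Dict String (List String)) (removed frontier : PySem.Set String) : PySem.Set String :=
  frontier.foldl
    (fun c u => (out.getD u []).foldl
      (fun c v => if PySem.Set.contains removed v then c else PySem.Set.add c v) c)
    PySem.Set.empty

-- frontier = {v for v in candidates if innbrs[v] <= removed}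
def pvNextFrontier (innbrs : PySem.Dict String (List String)) (removed candidates : PySem.Set String) : PySem.Set String :=
  candidates.foldl
    (fun f v => if PySem.Set.issubset (innbrs.getD v []) removed then PySem.Set.add f v else f)
    PySem.Set.empty

-- the 'while frontier' loop; fuel (|nodes| + 1) is only a totality guard (each wave removes ≥ 1 node)
def pvLoopB (nodes : PySem.Set String) (innbrs out : PySem.Dict String (List String)) :
    Nat → PySem.Set String → PySem.Set String → Int → List String × Int
  | 0, _, removed, iterations => (PySem.Set.diff nodes removed, iterations)
  | fuel+1, frontier, removed, iterations =>
      if frontier.isEmpty then (PySem.Set.diff nodes removed, iterations)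
      else
        let removed' := PySem.Set.union removed frontier
        let frontier' := pvNextFrontier innbrs removed' (pvCandidates out removed' frontier)
        pvLoopB nodes innbrs out fuel frontier' removed' (iterations + 1)

def compute_gf_fixpoint_py_alt (scc_set : List String) (edges : List (String × List String)) (reverse_edges : List (String × List String)) : List String × Int :=
  let revd := PySem.Dict.ofList reverse_edges
  let nodes := PySem.Set.ofList scc_set
  let p := pvBuild revd nodes
  let frontier : PySem.Set String :=
    nodes.foldl (fun f n => if (p.1.getD n []).isEmpty then PySem.Set.add f n else f) PySem.Set.empty
  pvLoopB nodes p.1 p.2 (nodes.length + 1) frontier PySem.Set.empty 0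

-- ===== PRECONDITION & SPEC =====
def Spec_compute_gf_fixpoint_py (scc_set : List String) (edges : List (String × List String)) (reverse_edges : List (String × List String)) (out : List String × Int) : Prop := out = compute_gf_fixpoint_py_alt scc_set edges reverse_edges
instance (scc_set : List String) (edges : List (String × List String)) (reverse_edges : List (String × List String)) (out : List String × Int) : Decidable (Spec_compute_gf_fixpoint_py scc_set edges reverse_edges out) := by unfold Spec_compute_gf_fixpoint_py; infer_instance

-- ===== CLAIM (what is proved, stated in full; the proofs are below) =====
def Claim_equal_compute_gf_fixpoint_py : Prop := ∀ (scc_set : List String) (edges : List (String × List String)) (reverse_edges : List (String × List String)), Dom_compute_gf_fixpoint_py scc_set edges reverse_edges → Spec_compute_gf_fixpoint_py scc_set edges reverse_edges (compute_gf_fixpoint_py scc_set edges reverse_edges)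

-- ===== LEMMAS AND PROOFS =====

-- generic: membership of a guarded-add set-building fold
theorem pv_mem_add_if (p : String → Prop) [DecidablePred p] :
    ∀ (l acc : List String) (x : String),
    x ∈ l.foldl (fun s n => if p n then PySem.Set.add s n else s) acc ↔ x ∈ acc ∨ (x ∈ l ∧ p x) := by
  intro l
  induction l with
  | nil => simp
  | cons a t ih =>
    intro acc x
    simp only [List.foldl_cons]
    by_cases hpa : p a
    · rw [if_pos hpa, ih, PySem.Set.mem_add]
      simp only [List.mem_cons]
      constructor
      · rintro (⟨h | h⟩ | h)
        · exact Or.inl h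
        · exact Or.inr ⟨Or.inl h, h ▸ hpa⟩
        · exact Or.inr ⟨Or.inr h.1, h.2⟩
      · rintro (h | ⟨h | h, hp⟩)
        · exact Or.inl (Or.inl h)
        · exact Or.inl (Or.inr h)
        · exact Or.inr ⟨h, hp⟩
    · rw [if_neg hpa, ih]
      simp only [List.mem_cons]
      constructor
      · rintro (h | h)
        · exact Or.inl h
        · exact Or.inr ⟨Or.inr h.1, h.2⟩
      · rintro (h | ⟨h | h, hp⟩)
        · exact Or.inl h
        · exact absurd (h ▸ hp) hpa
        · exact Or.inr ⟨h, hp⟩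

-- membership of the inner candidate-collecting fold
theorem pv_mem_add_unless (r : PySem.Set String) :
    ∀ (l c : List String) (x : String),
    x ∈ l.foldl (fun c v => if PySem.Set.contains r v then c else PySem.Set.add c v) c ↔
      x ∈ c ∨ (x ∈ l ∧ x ∉ r) := by
  intro l
  induction l with
  | nil => simp
  | cons a t ih =>
    intro c x
    simp only [List.foldl_cons]
    by_cases hra : a ∈ r
    · rw [if_pos (by simpa [PySem.Set.contains] using hra), ih]
      simp only [List.mem_cons]
      constructor
      · rintro (h | h)
        · exact Or.inl h
        · exact Or.inr ⟨Or.inr h.1, h.2⟩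
      · rintro (h | ⟨h | h, hp⟩)
        · exact Or.inl h
        · exact absurd (h ▸ hra) hp
        · exact Or.inr ⟨h, hp⟩
    · rw [if_neg (by simpa [PySem.Set.contains] using hra), ih, PySem.Set.mem_add]
      simp only [List.mem_cons]
      constructor
      · rintro (⟨h | h⟩ | h)
        · exact Or.inl h
        · exact Or.inr ⟨Or.inl h, h ▸ hra⟩
        · exact Or.inr ⟨Or.inr h.1, h.2⟩
      · rintro (h | ⟨h | h, hp⟩)
        · exact Or.inl (Or.inl h)
        · exact Or.inl (Or.inr h)
        · exact Or.inr ⟨h, hp⟩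

-- membership of the candidates double fold
theorem pv_mem_candidates (out : PySem.Dict String (List String)) (r : PySem.Set String) :
    ∀ (l c : List String) (x : String),
    x ∈ l.foldl (fun c u => (out.getD u []).foldl
        (fun c v => if PySem.Set.contains r v then c else PySem.Set.add c v) c) c ↔
      x ∈ c ∨ ∃ u ∈ l, x ∈ out.getD u [] ∧ x ∉ r := by
  intro l
  induction l with
  | nil => simp
  | cons a t ih =>
    intro c x
    simp only [List.foldl_cons]
    rw [ih, pv_mem_add_unless]
    simp only [List.mem_cons]
    constructor
    · rintro (⟨h | h⟩ | ⟨u, hu, h1, h2⟩)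
      · exact Or.inl h
      · exact Or.inr ⟨a, Or.inl rfl, h.1, h.2⟩
      · exact Or.inr ⟨u, Or.inr hu, h1, h2⟩
    · rintro (h | ⟨u, hu | hu, h1, h2⟩)
      · exact Or.inl (Or.inl h)
      · exact Or.inl (Or.inr ⟨hu ▸ h1, h2⟩)
      · exact Or.inr ⟨u, hu, h1, h2⟩

-- membership spec of the filtered in-neighbour set
theorem pv_mem_srcsOf (revd : PySem.Dict String (List String)) (nodes : PySem.Set String) (n s : String) :
    s ∈ pvSrcsOf revd nodes n ↔ s ∈ revd.getD n [] ∧ s ∈ nodes := by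
  unfold pvSrcsOf
  rw [PySem.List.foldl_if_eq_foldl_filter]
  rw [show (PySem.Set.empty : PySem.Set String) = ([] : List String) from rfl, ← PySem.Set.ofList_eq_foldl]
  simp [PySem.Set.mem_ofList, List.mem_filter, PySem.Set.contains]

-- A's in-degree is 0 iff no in-neighbour is in current
theorem pv_indegA_eq_zero (revd : PySem.Dict String (List String)) (current : PySem.Set String) (node : String) :
    pvIndegA revd current node = 0 ↔ ∀ src ∈ revd.getD node [], src ∉ current := by
  unfold pvIndegA
  rw [PySem.List.foldl_if_add_one]
  simp [List.countP_eq_zero, PySem.Set.mem_ofList, PySem.Set.contains]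

-- membership spec of A's to_remove set
theorem pv_mem_toRemove (revd : PySem.Dict String (List String)) (current : PySem.Set String) (x : String) :
    x ∈ pvToRemove revd current ↔ x ∈ current ∧ pvIndegA revd current x = 0 := by
  unfold pvToRemove
  rw [pv_mem_add_if]
  simp [PySem.Set.empty]

-- membership spec of B's candidate set
theorem pv_mem_cand (out : PySem.Dict String (List String)) (removed frontier : PySem.Set String) (x : String) :
    x ∈ pvCandidates out removed frontier ↔ ∃ u ∈ frontier, x ∈ out.getD u [] ∧ x ∉ removed := by
  unfold pvCandidates
  rw [pv_mem_candidates]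
  simp [PySem.Set.empty]

-- membership spec of B's next frontier
theorem pv_mem_nextFrontier (innbrs : PySem.Dict String (List String)) (removed candidates : PySem.Set String) (x : String) :
    x ∈ pvNextFrontier innbrs removed candidates ↔
      x ∈ candidates ∧ ∀ s ∈ innbrs.getD x [], s ∈ removed := by
  unfold pvNextFrontier
  rw [pv_mem_add_if (p := fun v => PySem.Set.issubset (innbrs.getD v []) removed = true)]
  simp [PySem.Set.empty, PySem.Set.issubset_iff]

theorem pv_foldl_pair {α β γ : Type} (step : (β × γ) → α → β × γ) (f : β → α → β) (g : γ → α → γ)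
    (h : ∀ p x, step p x = (f p.1 x, g p.2 x)) :
    ∀ (l : List α) (a : β) (b : γ), l.foldl step (a, b) = (l.foldl f a, l.foldl g b) := by
  intro l
  induction l with
  | nil => intro a b; rfl
  | cons x t ih => intro a b; simp only [List.foldl_cons, h]; exact ih _ _

-- the build loop is a pair of independent folds
theorem pvBuild_eq (revd : PySem.Dict String (List String)) (nodes : PySem.Set String) :
    pvBuild revd nodes =
      (nodes.foldl (fun d n => d.insert n (pvSrcsOf revd nodes n)) PySem.Dict.empty,
       nodes.foldl (fun o n => (pvSrcsOf revd nodes n).foldl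
         (fun o s => o.modify s [] (fun t => PySem.Set.add t n)) o) PySem.Dict.empty) := by
  unfold pvBuild
  exact pv_foldl_pair
    (step := fun (p : PySem.Dict String (List String) × PySem.Dict String (List String)) n =>
      let srcs := pvSrcsOf revd nodes n
      (p.1.insert n srcs, srcs.foldl (fun o s => o.modify s [] (fun t => PySem.Set.add t n)) p.2))
    (f := fun d n => d.insert n (pvSrcsOf revd nodes n))
    (g := fun o n => (pvSrcsOf revd nodes n).foldl (fun o s => o.modify s [] (fun t => PySem.Set.add t n)) o)
    (fun p x => rfl) nodes _ _

theorem pv_getD_insert_fold (F : String → List String) (n : String) :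
    ∀ (l : List String) (d : PySem.Dict String (List String)),
    (l.foldl (fun d n => d.insert n (F n)) d).getD n [] = if n ∈ l then F n else d.getD n [] := by
  intro l
  induction l with
  | nil => simp
  | cons a t ih =>
    intro d
    simp only [List.foldl_cons, ih]
    by_cases hmem : n ∈ t
    · simp [hmem]
    · by_cases hna : n = a
      · subst hna; simp [hmem, PySem.Dict.getD_insert_self]
      · simp [hmem, hna, PySem.Dict.getD_insert_of_ne _ _ _ hna]

-- innbrs lookup after the build loop
theorem pv_innbrs_getD (revd : PySem.Dict String (List String)) (nodes : PySem.Set String)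
    (n : String) (hn : n ∈ nodes) :
    (pvBuild revd nodes).1.getD n [] = pvSrcsOf revd nodes n := by
  rw [pvBuild_eq]
  simp only []
  rw [pv_getD_insert_fold]
  simp [hn]

theorem pv_out_inner (v' u x : String) :
    ∀ (srcs : List String) (o : PySem.Dict String (List String)),
    x ∈ (srcs.foldl (fun o s => o.modify s [] (fun t => PySem.Set.add t v')) o).getD u [] ↔
      x ∈ o.getD u [] ∨ (u ∈ srcs ∧ x = v') := by
  intro srcs
  induction srcs with
  | nil => simp
  | cons s t ih =>
    intro o
    simp only [List.foldl_cons, ih]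
    by_cases hus : u = s
    · subst hus
      rw [PySem.Dict.getD_modify]
      simp [PySem.Set.mem_add]
      tauto
    · rw [PySem.Dict.getD_modify]
      simp [hus]

-- out lookup after the build loop
theorem pv_out_getD (revd : PySem.Dict String (List String)) (nodes : PySem.Set String) (u x : String) :
    x ∈ (pvBuild revd nodes).2.getD u [] ↔ x ∈ nodes ∧ u ∈ pvSrcsOf revd nodes x := by
  rw [pvBuild_eq]
  simp only []
  have main : ∀ (l : List String) (o : PySem.Dict String (List String)),
      x ∈ (l.foldl (fun o n => (pvSrcsOf revd nodes n).foldl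
        (fun o s => o.modify s [] (fun t => PySem.Set.add t n)) o) o).getD u [] ↔
      x ∈ o.getD u [] ∨ ∃ n ∈ l, u ∈ pvSrcsOf revd nodes n ∧ x = n := by
    intro l
    induction l with
    | nil => simp
    | cons a t ih =>
      intro o
      simp only [List.foldl_cons, ih, pv_out_inner]
      constructor
      · rintro (⟨h1 | ⟨h2, h3⟩⟩ | ⟨n, hn, h4, h5⟩)
        · exact Or.inl h1
        · exact Or.inr ⟨a, by simp, h2, h3⟩
        · exact Or.inr ⟨n, by simp [hn], h4, h5⟩
      · rintro (h1 | ⟨n, hn, h4, h5⟩)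
        · exact Or.inl (Or.inl h1)
        · rcases List.mem_cons.mp hn with h | h
          · subst h; exact Or.inl (Or.inr ⟨h4, h5⟩)
          · exact Or.inr ⟨n, h, h4, h5⟩
  rw [main]
  simp only [PySem.Dict.getD_empty, List.not_mem_nil, false_or]
  constructor
  · rintro ⟨n, hn, h4, h5⟩; subst h5; exact ⟨hn, h4⟩
  · rintro ⟨hx, h4⟩; exact ⟨x, hx, h4, rfl⟩

-- B's loop on an empty frontier returns immediately, with any fuel
theorem pv_loopB_nil (nodes : PySem.Set String) (innbrs out : PySem.Dict String (List String))
    (fuel : Nat) (removed : PySem.Set String) (it : Int) :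
    pvLoopB nodes innbrs out fuel [] removed it = (PySem.Set.diff nodes removed, it) := by
  cases fuel <;> rfl

-- the lockstep loop equivalence
theorem pv_loop_eq (revd : PySem.Dict String (List String)) (nodes : PySem.Set String)
    (innbrs out : PySem.Dict String (List String))
    (hin : ∀ n, n ∈ nodes → innbrs.getD n [] = pvSrcsOf revd nodes n)
    (hout : ∀ u x, x ∈ out.getD u [] ↔ x ∈ nodes ∧ u ∈ pvSrcsOf revd nodes x) :
    ∀ (fa : Nat) (current frontier removed : PySem.Set String) (it : Int),
      current.length < fa →
      current = PySem.Set.diff nodes removed →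
      (∀ v, v ∈ frontier ↔ v ∈ current ∧ pvIndegA revd current v = 0) →
      ∀ fb : Nat, current.length < fb →
      pvLoopA revd fa current it = pvLoopB nodes innbrs out fb frontier removed it := by
  intro fa
  induction fa with
  | zero => intro current _ _ _ h; omega
  | succ fa ih =>
    intro current frontier removed it hfa hcur hfro fb hfb
    obtain ⟨fb', rfl⟩ : ∃ fb', fb = fb' + 1 := ⟨fb - 1, by omega⟩
    have hfm : ∀ x, x ∈ frontier ↔ x ∈ pvToRemove revd current := by
      intro x; rw [pv_mem_toRemove, hfro]
    simp only [pvLoopA, pvLoopB]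
    set TR := pvToRemove revd current with hTRdef
    by_cases hempty : TR.isEmpty
    · have htr0 : TR = [] := List.isEmpty_iff.mp hempty
      have hf0 : frontier = [] := by
        rw [List.eq_nil_iff_forall_not_mem]
        intro x hx
        have := (hfm x).mp hx
        rw [htr0] at this
        simp at this
      rw [if_pos hempty, hf0]
      simp only [List.isEmpty_nil, if_pos]
      rw [← hcur]
    · have hfne : frontier.isEmpty = false := by
        rcases List.isEmpty_eq_false_iff_exists_mem.mp
          (Bool.eq_false_iff.mpr hempty) with ⟨z, hz⟩
        exact List.isEmpty_eq_false_iff_exists_mem.mpr ⟨z, (hfm z).mpr (hTRdef ▸ hz)⟩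
      rw [if_neg hempty, hfne]
      simp only [Bool.false_eq_true, if_false]
      -- names and facts for the new states
      have hmemr' : ∀ x, x ∈ PySem.Set.union removed frontier ↔ x ∈ removed ∨ x ∈ frontier := by
        intro x; exact PySem.Set.mem_update removed frontier x
      have hmemcur : ∀ x, x ∈ current ↔ x ∈ nodes ∧ x ∉ removed := by
        intro x; rw [hcur]; exact PySem.Set.mem_diff nodes removed x
      -- the pruned list is the same filter of nodes
      have hcur' : PySem.Set.diff current TR
          = PySem.Set.diff nodes (PySem.Set.union removed frontier) := by
        rw [hcur]
        show (List.filter _ (List.filter _ nodes)) = List.filter _ nodes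
        rw [List.filter_filter]
        apply List.filter_congr
        intro x hx
        by_cases hxr : x ∈ removed
        · have h1 : x ∉ current := fun hc => ((hmemcur x).mp hc).2 hxr
          have h3 : x ∈ PySem.Set.union removed frontier := (hmemr' x).mpr (Or.inl hxr)
          simp [PySem.Set.contains, hxr, h3]
        · by_cases hxf : x ∈ frontier
          · have h2 : x ∈ TR := hTRdef ▸ (hfm x).mp hxf
            have h3 : x ∈ PySem.Set.union removed frontier := (hmemr' x).mpr (Or.inr hxf)
            simp [PySem.Set.contains, hxr, h2, h3]
          · have h2 : x ∉ TR := fun ht => hxf ((hfm x).mpr (hTRdef ▸ ht))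
            have h3 : x ∉ PySem.Set.union removed frontier := by
              intro h; rcases (hmemr' x).mp h with h | h
              · exact hxr h
              · exact hxf h
            simp [PySem.Set.contains, hxr, h2, h3]
      rw [hcur']
      -- the new frontier is exactly the zero-in-degree nodes of the pruned list
      have hfro' : ∀ v, v ∈ pvNextFrontier innbrs (PySem.Set.union removed frontier)
            (pvCandidates out (PySem.Set.union removed frontier) frontier) ↔
          v ∈ PySem.Set.diff nodes (PySem.Set.union removed frontier) ∧
            pvIndegA revd (PySem.Set.diff nodes (PySem.Set.union removed frontier)) v = 0 := by
        intro v
        rw [pv_mem_nextFrontier, pv_mem_cand, PySem.Set.mem_diff, pv_indegA_eq_zero]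
        constructor
        · rintro ⟨⟨u, hu, hvout, hvr'⟩, hsub⟩
          have hvnodes : v ∈ nodes := ((hout u v).mp hvout).1
          refine ⟨⟨hvnodes, hvr'⟩, ?_⟩
          intro src hsrc hsrcmem
          have hsn : src ∈ nodes := ((PySem.Set.mem_diff _ _ _).mp hsrcmem).1
          have hsr' : src ∉ PySem.Set.union removed frontier := ((PySem.Set.mem_diff _ _ _).mp hsrcmem).2
          have : src ∈ pvSrcsOf revd nodes v := (pv_mem_srcsOf _ _ _ _).mpr ⟨hsrc, hsn⟩
          rw [hin v hvnodes] at hsub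
          exact hsr' (hsub src this)
        · rintro ⟨⟨hvnodes, hvr'⟩, hzero⟩
          have hvcur : v ∈ current := (hmemcur v).mpr
            ⟨hvnodes, fun hr => hvr' ((hmemr' v).mpr (Or.inl hr))⟩
          have hvnf : v ∉ frontier := fun hf => hvr' ((hmemr' v).mpr (Or.inr hf))
          have hpos : ¬ (pvIndegA revd current v = 0) := by
            intro h0
            exact hvnf ((hfro v).mpr ⟨hvcur, h0⟩)
          rw [pv_indegA_eq_zero] at hpos
          push Not at hpos
          obtain ⟨src, hsrc, hsrccur⟩ := hpos
          have hsn : src ∈ nodes := ((hmemcur src).mp hsrccur).1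
          have hsrcgone : src ∉ PySem.Set.diff nodes (PySem.Set.union removed frontier) :=
            hzero src hsrc
          have hsrcfro : src ∈ frontier := by
            rcases (hmemr' src).mp (by
              by_contra h
              exact hsrcgone ((PySem.Set.mem_diff _ _ _).mpr ⟨hsn, h⟩)) with h | h
            · exact absurd h ((hmemcur src).mp hsrccur).2
            · exact h
          refine ⟨⟨src, hsrcfro, ?_, hvr'⟩, ?_⟩
          · exact (hout src v).mpr ⟨hvnodes, (pv_mem_srcsOf _ _ _ _).mpr ⟨hsrc, hsn⟩⟩
          · rw [hin v hvnodes]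
            intro s hs
            obtain ⟨hsrev, hsnodes⟩ := (pv_mem_srcsOf _ _ _ _).mp hs
            by_contra hsr'
            exact hzero s hsrev ((PySem.Set.mem_diff _ _ _).mpr ⟨hsnodes, hsr'⟩)
      -- length strictly decreases
      have hlt : (PySem.Set.diff nodes (PySem.Set.union removed frontier)).length
          < current.length := by
        rw [← hcur']
        rcases List.isEmpty_eq_false_iff_exists_mem.mp (Bool.eq_false_iff.mpr hempty) with ⟨z, hz⟩
        have hzc : z ∈ current := ((pv_mem_toRemove _ _ _).mp (hTRdef ▸ hz)).1
        show (List.filter _ current).length < current.length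
        exact List.length_filter_lt_length_iff_exists.mpr ⟨z, hzc, by simp [PySem.Set.contains, hz]⟩
      by_cases hce : (PySem.Set.diff nodes (PySem.Set.union removed frontier)).isEmpty
      · rw [if_pos hce]
        have hgone : pvNextFrontier innbrs (PySem.Set.union removed frontier)
            (pvCandidates out (PySem.Set.union removed frontier) frontier) = [] := by
          rw [List.eq_nil_iff_forall_not_mem]
          intro x hx
          have := ((hfro' x).mp hx).1
          rw [List.isEmpty_iff.mp hce] at this
          simp at this
        rw [hgone, pv_loopB_nil]
      · rw [if_neg hce]
        exact ih _ _ _ _ (by omega) rfl hfro' fb' (by omega)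

-- the sets handed to the loops at the top level
theorem pv_diff_empty (nodes : PySem.Set String) : nodes = PySem.Set.diff nodes PySem.Set.empty := by
  show nodes = List.filter _ nodes
  simp [PySem.Set.contains, PySem.Set.empty]

theorem pv_frontier0 (revd : PySem.Dict String (List String)) (nodes : PySem.Set String) (v : String) :
    v ∈ nodes.foldl
        (fun f n => if ((pvBuild revd nodes).1.getD n []).isEmpty then PySem.Set.add f n else f)
        PySem.Set.empty ↔
      v ∈ nodes ∧ pvIndegA revd nodes v = 0 := by
  rw [pv_mem_add_if (p := fun n => ((pvBuild revd nodes).1.getD n []).isEmpty = true)]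
  simp only [PySem.Set.empty, List.not_mem_nil, false_or]
  constructor
  · rintro ⟨hv, hemp⟩
    rw [pv_innbrs_getD revd nodes v hv, List.isEmpty_iff, List.eq_nil_iff_forall_not_mem] at hemp
    refine ⟨hv, (pv_indegA_eq_zero _ _ _).mpr ?_⟩
    intro src hsrc hsn
    exact hemp src ((pv_mem_srcsOf _ _ _ _).mpr ⟨hsrc, hsn⟩)
  · rintro ⟨hv, hzero⟩
    rw [pv_indegA_eq_zero] at hzero
    refine ⟨hv, ?_⟩
    rw [pv_innbrs_getD revd nodes v hv, List.isEmpty_iff, List.eq_nil_iff_forall_not_mem]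
    intro s hs
    obtain ⟨hsrev, hsn⟩ := (pv_mem_srcsOf _ _ _ _).mp hs
    exact hzero s hsrev hsn

-- ===== VERDICT (by name: the statement is the Claim_ definition above) =====
theorem compute_gf_fixpoint_py_spec : Claim_equal_compute_gf_fixpoint_py := by
  intro scc_set edges reverse_edges _
  unfold Spec_compute_gf_fixpoint_py compute_gf_fixpoint_py compute_gf_fixpoint_py_alt
  simp only []
  exact pv_loop_eq (PySem.Dict.ofList reverse_edges) (PySem.Set.ofList scc_set)
    (pvBuild (PySem.Dict.ofList reverse_edges) (PySem.Set.ofList scc_set)).1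
    (pvBuild (PySem.Dict.ofList reverse_edges) (PySem.Set.ofList scc_set)).2
    (fun n hn => pv_innbrs_getD _ _ n hn)
    (pv_out_getD _ _)
    ((PySem.Set.ofList scc_set).length + 1)
    (PySem.Set.ofList scc_set) _ PySem.Set.empty 0
    (by omega)
    (pv_diff_empty _)
    (pv_frontier0 _ _)
    ((PySem.Set.ofList scc_set).length + 1)
    (by omega)
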